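-- pv_equiv track=rewrite | github.com/caio-videmelo/Python_ATM | src/python_atm.py | calcular_combinacoes
-- ===== SOURCE A (Python) =====
-- def calcular_combinacoes(valor):
--     combinacoes = []
--     for quantidade_nota50 in range(0, valor // 50 + 1):
--         for quantidade_nota20 in range(0, (valor - quantidade_nota50 * 50) // 20 + 1):
--             quantidade_nota10 = (valor - (quantidade_nota50 * 50 + quantidade_nota20 * 20)) // 10
--             if (quantidade_nota50 * 50 + quantidade_nota20 * 20 + quantidade_nota10 * 10) == valor:
--                 combinacoes.append((quantidade_nota50, quantidade_nota20, quantidade_nota10))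
--     combinacoes.sort(key=lambda x: x[0] + x[1] + x[2])
--     return combinacoes[:3]
-- ===== SOURCE B (Python) =====
-- def calcular_combinacoes(valor):
--     # One pass over the 50-note count: for each count of 50s only the three
--     # largest feasible 20-note counts can make the overall top-3 (more 20s =
--     # fewer notes), so only O(valor) candidates are generated and sorted.
--     best = []
--     if valor >= 0 and valor % 10 == 0:
--         v = valor // 10
--         for a in range(v // 5 + 1):
--             bmax = (v - 5 * a) // 2
--             for b in range(bmax, max(bmax - 3, -1), -1):
--                 best.append((v - 4 * a - b, a, b))
--         best.sort(key=lambda t: t[0])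
--         best = best[:3]
--     return [(a, b, n - a - b) for (n, a, b) in best]
-- ===== Notes on version B (the rewrite author's own statement) =====
-- stated objective: faster
-- what changed: Instead of enumerating every (n50,n20) combination (quadratic in valor) and stably sorting them all by note count, B generates for each 50-note count only the three largest feasible 20-note counts (any other combination is preceded by three cheaper ones with the same 50-note count), sorts these O(valor) candidates and keeps the first three.
import Mathlib
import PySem

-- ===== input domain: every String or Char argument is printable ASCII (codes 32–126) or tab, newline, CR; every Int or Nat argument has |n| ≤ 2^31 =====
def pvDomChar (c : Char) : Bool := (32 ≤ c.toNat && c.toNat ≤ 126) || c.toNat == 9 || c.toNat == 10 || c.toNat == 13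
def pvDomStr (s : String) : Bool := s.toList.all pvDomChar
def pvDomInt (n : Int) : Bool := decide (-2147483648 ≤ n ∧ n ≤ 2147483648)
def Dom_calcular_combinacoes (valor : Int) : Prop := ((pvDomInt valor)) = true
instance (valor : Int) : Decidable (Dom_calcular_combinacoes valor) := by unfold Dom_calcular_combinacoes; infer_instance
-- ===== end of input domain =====

-- B generates only the ≤ 3 best 20-note counts per 50-note count (O(valor)
-- candidates) instead of every combination (O(valor^2)); same return value.

-- ===== PORT A =====
def calcular_combinacoes (valor : Int) : List (List Int) :=
  let combinacoes : List (List Int) :=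
    (PySem.List.pyRange 0 (PySem.Int.floordiv valor 50 + 1) 1).foldl (fun acc quantidade_nota50 =>
      (PySem.List.pyRange 0 (PySem.Int.floordiv (valor - quantidade_nota50 * 50) 20 + 1) 1).foldl
        (fun acc2 quantidade_nota20 =>
          let quantidade_nota10 :=
            PySem.Int.floordiv (valor - (quantidade_nota50 * 50 + quantidade_nota20 * 20)) 10
          if quantidade_nota50 * 50 + quantidade_nota20 * 20 + quantidade_nota10 * 10 = valor then
            acc2 ++ [[quantidade_nota50, quantidade_nota20, quantidade_nota10]]
          else acc2) acc) []
  let combinacoes := PySem.List.sorted combinacoes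
    (fun x => PySem.List.pyGetD x 0 0 + PySem.List.pyGetD x 1 0 + PySem.List.pyGetD x 2 0) false
  PySem.List.slice combinacoes none (some 3)

-- ===== PORT B =====
def calcular_combinacoes_alt (valor : Int) : List (List Int) :=
  let best : List (Int × Int × Int) := []
  let best :=
    if 0 ≤ valor ∧ PySem.Int.mod valor 10 = 0 then
      let v := PySem.Int.floordiv valor 10
      let best := (PySem.List.pyRange 0 (PySem.Int.floordiv v 5 + 1) 1).foldl (fun acc a =>
        let bmax := PySem.Int.floordiv (v - 5 * a) 2
        (PySem.List.pyRange bmax (max (bmax - 3) (-1)) (-1)).foldl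
          (fun acc2 b => acc2 ++ [(v - 4 * a - b, a, b)]) acc) best
      let best := PySem.List.sorted best (fun t => t.1) false
      PySem.List.slice best none (some 3)
    else best
  best.map (fun t => [t.2.1, t.2.2, t.1 - t.2.1 - t.2.2])

-- ===== PRECONDITION & SPEC =====
def Spec_calcular_combinacoes (valor : Int) (out : List (List Int)) : Prop := out = calcular_combinacoes_alt valor
instance (valor : Int) (out : List (List Int)) : Decidable (Spec_calcular_combinacoes valor out) := by unfold Spec_calcular_combinacoes; infer_instance

-- ===== CLAIM (what is proved, stated in full; the proofs are below) =====
def Claim_equal_calcular_combinacoes : Prop := ∀ (valor : Int), Dom_calcular_combinacoes valor → Spec_calcular_combinacoes valor (calcular_combinacoes valor)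

-- ===== LEMMAS AND PROOFS =====

-- abbreviations for the proof: key (total note count), first/second component of an entry
def keyA (x : List Int) : Int :=
  PySem.List.pyGetD x 0 0 + PySem.List.pyGetD x 1 0 + PySem.List.pyGetD x 2 0
def aOf (x : List Int) : Int := PySem.List.pyGetD x 0 0
def bOf (x : List Int) : Int := PySem.List.pyGetD x 1 0
-- the strict order that characterises Python's stable sort output on our lists
def pvR (p q : List Int) : Prop := keyA p < keyA q ∨ (keyA p = keyA q ∧ aOf p < aOf q)
-- "key strictly less, or key equal and generation rank strictly less"
def pvRst {α : Type} (key ρ : α → Int) (p q : α) : Prop :=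
  key p < key q ∨ (key p = key q ∧ ρ p < ρ q)

def trip (w a b : Int) : List Int := [a, b, w - 5*a - 2*b]
def rowA (w a : Int) : List (List Int) :=
  (PySem.List.pyRange 0 ((w - 5*a)/2 + 1) 1).map (trip w a)
def FA (w : Int) : List (List Int) := (PySem.List.pyRange 0 (w/5 + 1) 1).flatMap (rowA w)
def rowB (w a : Int) : List (Int × Int × Int) :=
  (PySem.List.pyRange ((w - 5*a)/2) (max ((w - 5*a)/2 - 3) (-1)) (-1)).map
    (fun b => (w - 4*a - b, a, b))
def CB (w : Int) : List (Int × Int × Int) := (PySem.List.pyRange 0 (w/5 + 1) 1).flatMap (rowB w)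
def toL (t : Int × Int × Int) : List Int := [t.2.1, t.2.2, t.1 - t.2.1 - t.2.2]
def rhoA (w : Int) (x : List Int) : Int := aOf x * (w + 1) + bOf x
def rhoB (w : Int) (t : Int × Int × Int) : Int := t.2.1 * (w + 2) - t.2.2
-- candidate predicate: the 20-note count is within 2 of its maximum for that 50-note count
def PwB (w : Int) (x : List Int) : Bool := decide ((w - 5 * aOf x)/2 - 2 ≤ bOf x)

-- insertBy equation
theorem pvInsertBy_cons {α : Type} (before : α → α → Bool) (x y : α) (ys : List α) :
    PySem.List.insertBy before x (y :: ys) =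
      if before x y then x :: y :: ys else y :: PySem.List.insertBy before x ys := rfl

theorem pvRst_key_le {α : Type} {key ρ : α → Int} {p q : α} (h : pvRst key ρ p q) :
    key p ≤ key q := by
  rcases h with h | ⟨h, _⟩ <;> omega

theorem pvR_asymm {p q : List Int} (h1 : pvR p q) (h2 : pvR q p) : False := by
  rcases h1 with h1 | ⟨h1, h1'⟩ <;> rcases h2 with h2 | ⟨h2, h2'⟩ <;> omega

theorem pvInsertBy_stable {α : Type} (key ρ : α → Int) (x : α) (acc : List α)
    (hp : acc.Pairwise (pvRst key ρ)) (hρ : ∀ y ∈ acc, ρ y < ρ x) :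
    (PySem.List.insertBy (fun a b => decide (key a < key b)) x acc).Pairwise (pvRst key ρ) := by
  induction acc with
  | nil => simp [PySem.List.insertBy, pvRst]
  | cons y ys ih =>
    rcases List.pairwise_cons.mp hp with ⟨hy, hys⟩
    rw [pvInsertBy_cons]
    by_cases h : key x < key y
    · simp only [h, decide_true, if_true]
      refine List.pairwise_cons.mpr ⟨?_, hp⟩
      intro z hz
      rcases List.mem_cons.mp hz with rfl | hz'
      · exact Or.inl h
      · exact Or.inl (lt_of_lt_of_le h (pvRst_key_le (hy z hz')))
    · simp only [h, decide_false]
      refine List.pairwise_cons.mpr ⟨?_, ih hys (fun z hz => hρ z (List.mem_cons_of_mem y hz))⟩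
      intro z hz
      rcases (PySem.List.mem_insertBy _ x z ys).mp hz with rfl | hz'
      · rcases lt_or_eq_of_le (le_of_not_gt h) with h' | h'
        · exact Or.inl h'
        · exact Or.inr ⟨h', hρ y List.mem_cons_self⟩
      · exact hy z hz'

theorem pvSorted_stable {α : Type} (key ρ : α → Int) (xs : List α)
    (h : xs.Pairwise (fun p q => ρ p < ρ q)) :
    (PySem.List.sorted xs key false).Pairwise (pvRst key ρ) := by
  induction xs using List.reverseRecOn with
  | nil => simp [PySem.List.sorted]
  | append_singleton l x ih =>
    rcases List.pairwise_append.mp h with ⟨hl, _, hcross⟩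
    rw [PySem.List.sorted_eq_foldl_insertBy, List.foldl_append, List.foldl_cons, List.foldl_nil,
      ← PySem.List.sorted_eq_foldl_insertBy]
    exact pvInsertBy_stable key ρ x _ (ih hl)
      (fun y hy => hcross y ((PySem.List.mem_sorted l key false y).mp hy) x (List.mem_singleton_self x))

theorem pvPairwise_flatMap {α β : Type} (S : β → β → Prop) (l : List α) (f : α → List β)
    (h1 : ∀ a ∈ l, (f a).Pairwise S)
    (h2 : l.Pairwise (fun a a' => ∀ x ∈ f a, ∀ y ∈ f a', S x y)) :
    (l.flatMap f).Pairwise S := by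
  induction l with
  | nil => simp
  | cons a l ih =>
    rcases List.pairwise_cons.mp h2 with ⟨ha, hl⟩
    rw [List.flatMap_cons]
    refine List.pairwise_append.mpr ⟨h1 a List.mem_cons_self, ih (fun a' h => h1 a' (List.mem_cons_of_mem a h)) hl, ?_⟩
    intro x hx y hy
    rcases List.mem_flatMap.mp hy with ⟨a', ha', hy'⟩
    exact ha a' ha' x hx y hy'

theorem pvTake_filter {α : Type} (p : α → Bool) :
    ∀ (l : List α) (n : Nat), (∀ x ∈ l.take n, p x = true) →
      (l.filter p).take n = l.take n := by
  intro l
  induction l with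
  | nil => simp
  | cons a l ih =>
    intro n h
    cases n with
    | zero => simp
    | succ n =>
      have ha : p a = true := h a (by simp)
      rw [List.take_succ_cons, List.filter_cons_of_pos ha, List.take_succ_cons,
        ih n (fun x hx => h x (by simp [hx]))]

theorem pvMem_take_of_rel {α : Type} (S : α → α → Prop)
    (hasym : ∀ p q, S p q → S q p → False) (l : List α) (n : Nat)
    (hp : l.Pairwise S) {x y : α} (hx : x ∈ l.take n) (hy : y ∈ l) (hxy : S y x) :
    y ∈ l.take n := by
  have hsplit : l = l.take n ++ l.drop n := (List.take_append_drop n l).symm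
  rw [hsplit] at hp hy
  rcases List.mem_append.mp hy with h | h
  · exact h
  · exact absurd hxy (fun hxy => hasym _ _ ((List.pairwise_append.mp hp).2.2 x hx y h) hxy)

theorem pvPerm_flatMap_congr {α β : Type} (l : List α) (f g : α → List β)
    (h : ∀ a ∈ l, (f a).Perm (g a)) : (l.flatMap f).Perm (l.flatMap g) := by
  induction l with
  | nil => simp
  | cons a l ih =>
    rw [List.flatMap_cons, List.flatMap_cons]
    exact (h a List.mem_cons_self).append (ih (fun a' h' => h a' (List.mem_cons_of_mem a h')))

theorem pvFilter_pyRange (l u c : Int) :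
    (PySem.List.pyRange l u 1).filter (fun b => decide (c ≤ b)) =
      PySem.List.pyRange (max l c) u 1 := by
  rcases le_total c l with h | h
  · rw [max_eq_left h, List.filter_eq_self.mpr]
    intro b hb
    exact decide_eq_true (le_trans h ((PySem.List.mem_pyRange_one).mp hb).1)
  · rw [max_eq_right h]
    by_cases hcu : c ≤ u
    · have h1 : (PySem.List.pyRange l c 1).filter (fun b => decide (c ≤ b)) = [] :=
        List.filter_eq_nil_iff.mpr (fun b hb => by
          have := (PySem.List.mem_pyRange_one).mp hb
          simp only [decide_eq_true_eq]; omega)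
      have h2 : (PySem.List.pyRange c u 1).filter (fun b => decide (c ≤ b)) =
          PySem.List.pyRange c u 1 :=
        List.filter_eq_self.mpr (fun b hb =>
          decide_eq_true ((PySem.List.mem_pyRange_one).mp hb).1)
      rw [PySem.List.pyRange_one_append l c u h hcu, List.filter_append, h1, h2,
        List.nil_append]
    · have h1 : (PySem.List.pyRange l u 1).filter (fun b => decide (c ≤ b)) = [] :=
        List.filter_eq_nil_iff.mpr (fun b hb => by
          have := (PySem.List.mem_pyRange_one).mp hb
          simp only [decide_eq_true_eq]; omega)
      rw [h1, PySem.List.pyRange_one_eq_nil (by omega)]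

-- component computations
theorem pvKeyA_trip (w a b : Int) : keyA (trip w a b) = w - 4*a - b := by
  show a + b + (w - 5*a - 2*b) = w - 4*a - b
  ring
theorem pvAOf_trip (w a b : Int) : aOf (trip w a b) = a := rfl
theorem pvBOf_trip (w a b : Int) : bOf (trip w a b) = b := rfl
theorem pvToL_eq_trip (w a b : Int) : toL (w - 4*a - b, a, b) = trip w a b := by
  show [a, b, w - 4*a - b - a - b] = [a, b, w - 5*a - 2*b]
  norm_num
  ring

theorem pvMem_FA {w : Int} {x : List Int} :
    x ∈ FA w ↔ ∃ a b : Int, 0 ≤ a ∧ a ≤ w/5 ∧ 0 ≤ b ∧ b ≤ (w - 5*a)/2 ∧ x = trip w a b := by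
  simp only [FA, rowA, List.mem_flatMap, List.mem_map, PySem.List.mem_pyRange_one]
  constructor
  · rintro ⟨a, ⟨ha0, ha1⟩, b, ⟨hb0, hb1⟩, rfl⟩
    exact ⟨a, b, ha0, by omega, hb0, by omega, rfl⟩
  · rintro ⟨a, b, ha0, ha1, hb0, hb1, rfl⟩
    exact ⟨a, ⟨ha0, by omega⟩, b, ⟨hb0, by omega⟩, rfl⟩

theorem pvMem_CB {w : Int} {t : Int × Int × Int} :
    t ∈ CB w ↔ ∃ a b : Int, 0 ≤ a ∧ a ≤ w/5 ∧ 0 ≤ b ∧ (w - 5*a)/2 - 3 < b ∧ b ≤ (w - 5*a)/2 ∧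
      t = (w - 4*a - b, a, b) := by
  simp only [CB, rowB, List.mem_flatMap, List.mem_map, PySem.List.mem_pyRange_one,
    PySem.List.mem_pyRange_neg_one]
  constructor
  · rintro ⟨a, ⟨ha0, ha1⟩, b, ⟨hb0, hb1⟩, rfl⟩
    exact ⟨a, b, ha0, by omega, by omega, by omega, hb1, rfl⟩
  · rintro ⟨a, b, ha0, ha1, hb0, hb1, hb2, rfl⟩
    exact ⟨a, ⟨ha0, by omega⟩, b, ⟨by omega, hb2⟩, rfl⟩

theorem pvCross (w a a' b b' : Int) (hw : 0 ≤ w) (ha0 : 0 ≤ a) (haa : a < a')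
    (hb0 : 0 ≤ b) (hb1 : 2*b ≤ w - 5*a) (hb0' : 0 ≤ b') :
    a * (w + 1) + b < a' * (w + 1) + b' := by
  have h1 : (a + 1) * (w + 1) ≤ a' * (w + 1) :=
    mul_le_mul_of_nonneg_right (by omega) (by omega)
  have h2 : (a + 1) * (w + 1) = a * (w + 1) + (w + 1) := by ring
  have hbw : b ≤ w := by omega
  linarith

theorem pvCrossB (w a a' b b' : Int) (hw : 0 ≤ w) (ha0 : 0 ≤ a) (haa : a < a')
    (hb0 : 0 ≤ b) (hb1 : 2*b ≤ w - 5*a) (hb0' : 0 ≤ b') (ha0' : 0 ≤ a')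
    (hb1' : 2*b' ≤ w - 5*a') :
    a * (w + 2) - b < a' * (w + 2) - b' := by
  have h1 : (a + 1) * (w + 2) ≤ a' * (w + 2) :=
    mul_le_mul_of_nonneg_right (by omega) (by omega)
  have h2 : (a + 1) * (w + 2) = a * (w + 2) + (w + 2) := by ring
  have hbw : b' ≤ w := by omega
  linarith

theorem pvFA_pairwise (w : Int) (hw : 0 ≤ w) :
    (FA w).Pairwise (fun p q => rhoA w p < rhoA w q) := by
  apply pvPairwise_flatMap
  · intro a _
    unfold rowA
    rw [List.pairwise_map]
    apply List.Pairwise.imp_of_mem ?_ (PySem.List.pairwise_lt_pyRange_one _ _)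
    intro b b' _ _ hbb
    show rhoA w (trip w a b) < rhoA w (trip w a b')
    show a * (w+1) + b < a * (w+1) + b'
    omega
  · apply List.Pairwise.imp_of_mem ?_ (PySem.List.pairwise_lt_pyRange_one _ _)
    intro a a' haM haM' haa x hx y hy
    rcases List.mem_map.mp hx with ⟨b, hb, rfl⟩
    rcases List.mem_map.mp hy with ⟨b', hb', rfl⟩
    rw [PySem.List.mem_pyRange_one] at hb hb' haM haM'
    show a * (w+1) + b < a' * (w+1) + b'
    exact pvCross w a a' b b' hw (by omega) haa (by omega) (by omega) (by omega)

theorem pvCB_pairwise (w : Int) (hw : 0 ≤ w) :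
    (CB w).Pairwise (fun p q => rhoB w p < rhoB w q) := by
  apply pvPairwise_flatMap
  · intro a _
    unfold rowB
    rw [List.pairwise_map]
    have hrev : (PySem.List.pyRange ((w - 5*a)/2) (max ((w - 5*a)/2 - 3) (-1)) (-1)).Pairwise
        (fun x y => y < x) := by
      rw [PySem.List.pyRange_neg_one_eq_reverse, List.pairwise_reverse]
      exact (PySem.List.pairwise_lt_pyRange_one _ _)
    apply List.Pairwise.imp_of_mem ?_ hrev
    intro b b' _ _ hbb
    show rhoB w (w - 4*a - b, a, b) < rhoB w (w - 4*a - b', a, b')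
    show a * (w+2) - b < a * (w+2) - b'
    omega
  · apply List.Pairwise.imp_of_mem ?_ (PySem.List.pairwise_lt_pyRange_one _ _)
    intro a a' haM haM' haa x hx y hy
    rcases List.mem_map.mp hx with ⟨b, hb, rfl⟩
    rcases List.mem_map.mp hy with ⟨b', hb', rfl⟩
    rw [PySem.List.mem_pyRange_neg_one] at hb hb'
    rw [PySem.List.mem_pyRange_one] at haM haM'
    show a * (w+2) - b < a' * (w+2) - b'
    exact pvCrossB w a a' b b' hw (by omega) haa (by omega) (by omega) (by omega) (by omega) (by omega)

-- A's stable sort is ordered by pvR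
theorem pvSA_pairwise (w : Int) (hw : 0 ≤ w) :
    (PySem.List.sorted (FA w) keyA false).Pairwise pvR := by
  apply List.Pairwise.imp_of_mem ?_ (pvSorted_stable keyA (rhoA w) (FA w) (pvFA_pairwise w hw))
  intro p q hp hq hR
  rw [PySem.List.mem_sorted] at hp hq
  rcases pvMem_FA.mp hp with ⟨a, b, ha0, ha1, hb0, hb1, rfl⟩
  rcases pvMem_FA.mp hq with ⟨a', b', ha0', ha1', hb0', hb1', rfl⟩
  rcases hR with h | ⟨hk, hr⟩
  · exact Or.inl h
  · refine Or.inr ⟨hk, ?_⟩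
    rw [pvKeyA_trip, pvKeyA_trip] at hk
    have hr' : a * (w+1) + b < a' * (w+1) + b' := hr
    rw [pvAOf_trip, pvAOf_trip]
    by_contra hca
    rcases eq_or_lt_of_le (le_of_not_gt (fun h' => hca h')) with h' | h'
    · subst h'; omega
    · have := pvCross w a' a b' b hw ha0' h' hb0' (by omega) hb0
      omega

-- B's stable sort, mapped to lists, is ordered by pvR
theorem pvLB_pairwise (w : Int) (hw : 0 ≤ w) :
    ((PySem.List.sorted (CB w) (fun t => t.1) false).map toL).Pairwise pvR := by
  rw [List.pairwise_map]
  apply List.Pairwise.imp_of_mem ?_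
    (pvSorted_stable (fun t => t.1) (rhoB w) (CB w) (pvCB_pairwise w hw))
  intro p q hp hq hR
  rw [PySem.List.mem_sorted] at hp hq
  rcases pvMem_CB.mp hp with ⟨a, b, ha0, ha1, hb0, hb2, hb1, rfl⟩
  rcases pvMem_CB.mp hq with ⟨a', b', ha0', ha1', hb0', hb2', hb1', rfl⟩
  rw [pvToL_eq_trip, pvToL_eq_trip]
  rcases hR with h | ⟨hk, hr⟩
  · exact Or.inl (by rw [pvKeyA_trip, pvKeyA_trip]; exact h)
  · refine Or.inr ⟨by rw [pvKeyA_trip, pvKeyA_trip]; exact hk, ?_⟩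
    have hk' : w - 4*a - b = w - 4*a' - b' := hk
    have hr' : a * (w+2) - b < a' * (w+2) - b' := hr
    rw [pvAOf_trip, pvAOf_trip]
    by_contra hca
    rcases eq_or_lt_of_le (le_of_not_gt (fun h' => hca h')) with h' | h'
    · subst h'; omega
    · have := pvCrossB w a' a b' b hw ha0' h' hb0' (by omega) hb0 ha0 (by omega)
      omega

theorem pvRowA_filter (w a : Int) :
    (rowA w a).filter (PwB w) =
      (PySem.List.pyRange (max 0 ((w - 5*a)/2 - 2)) ((w - 5*a)/2 + 1) 1).map (trip w a) := by
  unfold rowA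
  rw [List.filter_map]
  have hcomp : (PwB w ∘ trip w a) = (fun b => decide ((w - 5*a)/2 - 2 ≤ b)) := rfl
  rw [hcomp, pvFilter_pyRange]

theorem pvRowB_map (w a : Int) :
    (rowB w a).map toL =
      ((PySem.List.pyRange (max 0 ((w - 5*a)/2 - 2)) ((w - 5*a)/2 + 1) 1).map (trip w a)).reverse := by
  unfold rowB
  rw [List.map_map]
  have hcomp : (toL ∘ fun b => (w - 4*a - b, a, b)) = trip w a := by
    funext b
    exact pvToL_eq_trip w a b
  rw [hcomp, PySem.List.pyRange_neg_one_eq_reverse, List.map_reverse]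
  have harg : max ((w - 5*a)/2 - 3) (-1) + 1 = max 0 ((w - 5*a)/2 - 2) := by omega
  rw [harg]

theorem pvFilter_FA_perm (w : Int) (hw : 0 ≤ w) :
    ((FA w).filter (PwB w)).Perm ((CB w).map toL) := by
  unfold FA CB
  rw [List.filter_flatMap, List.map_flatMap]
  apply pvPerm_flatMap_congr
  intro a _
  rw [pvRowA_filter, pvRowB_map]
  exact (List.reverse_perm _).symm

theorem pvTake3_P (w : Int) (hw : 0 ≤ w) :
    ∀ x ∈ (PySem.List.sorted (FA w) keyA false).take 3, PwB w x = true := by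
  intro x hx
  by_contra hP
  have hxSA : x ∈ PySem.List.sorted (FA w) keyA false := List.mem_of_mem_take hx
  rcases pvMem_FA.mp ((PySem.List.mem_sorted _ _ _ _).mp hxSA) with
    ⟨a, b, ha0, ha1, hb0, hb1, rfl⟩
  have hbad : b < (w - 5*a)/2 - 2 := by
    have : ¬ ((w - 5 * aOf (trip w a b))/2 - 2 ≤ bOf (trip w a b)) := by
      simpa [PwB] using hP
    rw [pvAOf_trip, pvBOf_trip] at this
    omega
  have hmemtake : ∀ j : Int, 0 ≤ j → j ≤ 2 →
      trip w a ((w - 5*a)/2 - j) ∈ (PySem.List.sorted (FA w) keyA false).take 3 := by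
    intro j hj0 hj2
    have hmem : trip w a ((w - 5*a)/2 - j) ∈ FA w :=
      pvMem_FA.mpr ⟨a, (w - 5*a)/2 - j, ha0, ha1, by omega, by omega, rfl⟩
    refine pvMem_take_of_rel pvR (fun p q => pvR_asymm) _ 3 (pvSA_pairwise w hw) hx
      ((PySem.List.mem_sorted _ _ _ _).mpr hmem) ?_
    exact Or.inl (by rw [pvKeyA_trip, pvKeyA_trip]; omega)
  have hbinj : Function.Injective (trip w a) := by
    intro u v h
    have h2 := congrArg bOf h
    rwa [pvBOf_trip, pvBOf_trip] at h2
  have hnd0 : ([(w - 5*a)/2, (w - 5*a)/2 - 1, (w - 5*a)/2 - 2, b]).Nodup := by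
    simp
    omega
  have hnd : ([trip w a ((w - 5*a)/2), trip w a ((w - 5*a)/2 - 1),
      trip w a ((w - 5*a)/2 - 2), trip w a b]).Nodup := by
    simpa using hnd0.map hbinj
  have hsub : ([trip w a ((w - 5*a)/2), trip w a ((w - 5*a)/2 - 1),
      trip w a ((w - 5*a)/2 - 2), trip w a b]) ⊆
      (PySem.List.sorted (FA w) keyA false).take 3 := by
    intro z hz
    rcases List.mem_cons.mp hz with rfl | hz
    · simpa using hmemtake 0 (by omega) (by omega)
    rcases List.mem_cons.mp hz with rfl | hz
    · exact hmemtake 1 (by omega) (by omega)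
    rcases List.mem_cons.mp hz with rfl | hz
    · exact hmemtake 2 (by omega) (by omega)
    rcases List.mem_cons.mp hz with rfl | hz
    · exact hx
    · exact absurd hz (List.not_mem_nil)
  have hlen := (hnd.subperm hsub).length_le
  simp at hlen

theorem pvFilter_SA_eq (w : Int) (hw : 0 ≤ w) :
    (PySem.List.sorted (FA w) keyA false).filter (PwB w) =
      (PySem.List.sorted (CB w) (fun t => t.1) false).map toL := by
  have hperm : ((PySem.List.sorted (FA w) keyA false).filter (PwB w)).Perm
      ((PySem.List.sorted (CB w) (fun t => t.1) false).map toL) :=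
    (((PySem.List.sorted_perm (FA w) keyA false).filter (PwB w)).trans
      (pvFilter_FA_perm w hw)).trans
      ((PySem.List.sorted_perm (CB w) (fun t => t.1) false).map toL).symm
  exact List.Perm.eq_of_pairwise
    (fun p q _ _ h1 h2 => absurd h2 (fun h2 => pvR_asymm h1 h2))
    ((pvSA_pairwise w hw).filter (PwB w)) (pvLB_pairwise w hw) hperm

-- port reductions
theorem pvFoldl_const {α β : Type} (l : List α) (init : β) :
    l.foldl (fun acc _ => acc) init = init := by
  induction l generalizing init with
  | nil => rfl
  | cons a l ih => exact ih init

theorem pvPortA_good (w : Int) (hw : 0 ≤ w) :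
    calcular_combinacoes (10*w) = (PySem.List.sorted (FA w) keyA false).take 3 := by
  have hdiv50 : PySem.Int.floordiv (10*w) 50 = w/5 := by
    rw [PySem.Int.floordiv_eq_ediv_of_pos (by norm_num)]; omega
  simp only [calcular_combinacoes, hdiv50]
  have h3 : PySem.List.slice (PySem.List.sorted (FA w) keyA false) none (some 3) =
      (PySem.List.sorted (FA w) keyA false).take 3 := by
    simpa using PySem.List.slice_to_natCast (PySem.List.sorted (FA w) keyA false) 3
  rw [← h3]
  congr 2
  refine Eq.trans (PySem.List.foldl_congr_mem _ _ (fun acc a => acc ++ rowA w a) [] ?_) ?_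
  · intro acc a _
    have hdiv20 : PySem.Int.floordiv (10*w - a * 50) 20 = (w - 5*a)/2 := by
      rw [PySem.Int.floordiv_eq_ediv_of_pos (by norm_num)]; omega
    rw [hdiv20]
    refine Eq.trans
      (PySem.List.foldl_congr_mem _ _ (fun acc2 b => acc2 ++ [trip w a b]) acc ?_) ?_
    · intro acc2 b _
      have hdiv10 : PySem.Int.floordiv (10*w - (a * 50 + b * 20)) 10 = w - 5*a - 2*b := by
        rw [PySem.Int.floordiv_eq_ediv_of_pos (by norm_num)]; omega
      rw [hdiv10, if_pos (by ring)]
      rfl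
    · rw [PySem.List.foldl_append_singleton_eq_map]
      rfl
  · rw [PySem.List.foldl_append_eq_flatMap, List.nil_append]
    rfl

theorem pvPortA_bad (valor : Int) (h : valor < 0 ∨ valor % 10 ≠ 0) :
    calcular_combinacoes valor = [] := by
  simp only [calcular_combinacoes]
  by_cases hneg : valor < 0
  · have hr : PySem.List.pyRange 0 (PySem.Int.floordiv valor 50 + 1) 1 = [] :=
      PySem.List.pyRange_one_eq_nil (by
        rw [PySem.Int.floordiv_eq_ediv_of_pos (by norm_num)]; omega)
    rw [hr, List.foldl_nil]
    rfl
  · have hmod : valor % 10 ≠ 0 := by omega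
    have h0 : 0 ≤ valor := by omega
    have hX : (PySem.List.pyRange 0 (PySem.Int.floordiv valor 50 + 1) 1).foldl
        (fun acc quantidade_nota50 =>
          (PySem.List.pyRange 0
              (PySem.Int.floordiv (valor - quantidade_nota50 * 50) 20 + 1) 1).foldl
            (fun acc2 quantidade_nota20 =>
              if quantidade_nota50 * 50 + quantidade_nota20 * 20 +
                  (PySem.Int.floordiv
                    (valor - (quantidade_nota50 * 50 + quantidade_nota20 * 20)) 10) * 10 =
                  valor then
                acc2 ++ [[quantidade_nota50, quantidade_nota20,
                  PySem.Int.floordiv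
                    (valor - (quantidade_nota50 * 50 + quantidade_nota20 * 20)) 10]]
              else acc2) acc) [] = [] := by
      refine Eq.trans (PySem.List.foldl_congr_mem _ _ (fun acc _ => acc) [] ?_)
        (pvFoldl_const _ _)
      intro acc a _
      refine Eq.trans (PySem.List.foldl_congr_mem _ _ (fun acc2 _ => acc2) acc ?_)
        (pvFoldl_const _ _)
      intro acc2 b _
      refine if_neg ?_
      rw [PySem.Int.floordiv_eq_ediv_of_pos (by norm_num)]
      omega
    rw [hX]
    rfl

theorem pvPortB_good (w : Int) (hw : 0 ≤ w) :
    calcular_combinacoes_alt (10*w) =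
      ((PySem.List.sorted (CB w) (fun t => t.1) false).take 3).map toL := by
  have hcond : 0 ≤ 10*w ∧ PySem.Int.mod (10*w) 10 = 0 := by
    refine ⟨by omega, ?_⟩
    rw [PySem.Int.mod_eq_emod_of_pos (by norm_num)]
    omega
  have hdiv10 : PySem.Int.floordiv (10*w) 10 = w := by
    rw [PySem.Int.floordiv_eq_ediv_of_pos (by norm_num)]; omega
  have hdiv5 : PySem.Int.floordiv w 5 = w/5 :=
    PySem.Int.floordiv_eq_ediv_of_pos (by norm_num)
  simp only [calcular_combinacoes_alt, if_pos hcond, hdiv10, hdiv5]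
  have h3 : PySem.List.slice (PySem.List.sorted (CB w) (fun t => t.1) false) none (some 3) =
      (PySem.List.sorted (CB w) (fun t => t.1) false).take 3 := by
    simpa using PySem.List.slice_to_natCast (PySem.List.sorted (CB w) (fun t => t.1) false) 3
  rw [← h3]
  congr 3
  refine Eq.trans (PySem.List.foldl_congr_mem _ _ (fun acc a => acc ++ rowB w a) [] ?_) ?_
  · intro acc a _
    have hdiv2 : PySem.Int.floordiv (w - 5 * a) 2 = (w - 5*a)/2 := by
      rw [PySem.Int.floordiv_eq_ediv_of_pos (by norm_num)]
    rw [hdiv2]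
    refine Eq.trans (PySem.List.foldl_congr_mem _ _
      (fun acc2 b => acc2 ++ [(w - 4*a - b, a, b)]) acc ?_) ?_
    · intro acc2 b _
      rfl
    · rw [PySem.List.foldl_append_singleton_eq_map]
      rfl
  · rw [PySem.List.foldl_append_eq_flatMap, List.nil_append]
    rfl

theorem pvPortB_bad (valor : Int) (h : valor < 0 ∨ valor % 10 ≠ 0) :
    calcular_combinacoes_alt valor = [] := by
  have hcond : ¬ (0 ≤ valor ∧ PySem.Int.mod valor 10 = 0) := by
    rw [PySem.Int.mod_eq_emod_of_pos (by norm_num)]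
    omega
  simp only [calcular_combinacoes_alt, if_neg hcond]
  rfl

theorem pvMain (w : Int) (hw : 0 ≤ w) :
    calcular_combinacoes (10*w) = calcular_combinacoes_alt (10*w) := by
  rw [pvPortA_good w hw, pvPortB_good w hw, List.map_take,
    ← pvTake_filter (PwB w) (PySem.List.sorted (FA w) keyA false) 3 (pvTake3_P w hw),
    pvFilter_SA_eq w hw]

-- ===== VERDICT (by name: the statement is the Claim_ definition above) =====
theorem calcular_combinacoes_spec : Claim_equal_calcular_combinacoes := by
  intro valor _
  unfold Spec_calcular_combinacoes
  by_cases h : 0 ≤ valor ∧ valor % 10 = 0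
  · obtain ⟨h0, h10⟩ := h
    have hw : valor = 10 * (valor / 10) := by omega
    rw [hw]
    exact pvMain (valor / 10) (by omega)
  · have h' : valor < 0 ∨ valor % 10 ≠ 0 := by omega
    rw [pvPortA_bad valor h', pvPortB_bad valor h']
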